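-- pv_equiv track=rewrite | github.com/Ryuji-commit/Algorithms | Hull/Python_Hull.py | slow_hull
-- ===== SOURCE A (Python) =====
-- def is_p3_in_triangle(p0, p1, p2, p3):
--     x_list_triangle = [p0[0], p1[0], p2[0]]
--     y_list_triangle = [p0[1], p1[1], p2[1]]
--     if min(x_list_triangle) < p3[0] < max(x_list_triangle):
--         if min(y_list_triangle) < p3[1] < max(y_list_triangle):
--             return True
--     return False
--
-- def slow_hull(set_p):
--     len_of_set_p = len(set_p)
--     list_flag_of_p = [False] * len_of_set_p
--     for i in range(len_of_set_p):
--         p0 = set_p[i]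
--         for j in range(len_of_set_p):
--             if i == j:
--                 continue
--             p1 = set_p[j]
--             for k in range(len_of_set_p):
--                 if i == k or j == k:
--                     continue
--                 p2 = set_p[k]
--                 for l in range(len_of_set_p):
--                     if i == l or j == l or k == l:
--                         continue
--                     p3 = set_p[l]
--                     if is_p3_in_triangle(p0, p1, p2, p3):
--                         list_flag_of_p[l] = True
--     return [set_p[i] for i in range(len_of_set_p) if not list_flag_of_p[i]]
-- ===== SOURCE B (Python) =====
-- def _covers(trip):
--     return (any(t[0] < 0 for t in trip) and any(t[0] > 0 for t in trip)
--             and any(t[1] < 0 for t in trip) and any(t[1] > 0 for t in trip))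
--
-- def _feasible(cnt):
--     classes = list(cnt)
--     m = len(classes)
--     return any(
--         _ok(classes[a], classes[b], classes[c], cnt)
--         for a in range(m) for b in range(a, m) for c in range(b, m))
--
-- def _ok(ca, cb, cc, cnt):
--     trip = [ca, cb, cc]
--     if any(trip.count(t) > cnt[t] for t in trip):
--         return False
--     return _covers(trip)
--
-- def slow_hull(set_p):
--     n = len(set_p)
--     if n < 4:
--         return [p for p in set_p]
--     out = []
--     for l in range(n):
--         x, y = set_p[l][0], set_p[l][1]
--         cnt = {}
--         for j in range(n):
--             if j == l:
--                 continue
--             q = set_p[j]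
--             dx = (q[0] > x) - (q[0] < x)
--             dy = (q[1] > y) - (q[1] < y)
--             cnt[(dx, dy)] = cnt.get((dx, dy), 0) + 1
--         if not _feasible(cnt):
--             out.append(set_p[l])
--     return out
-- ===== Notes on version B (the rewrite author's own statement) =====
-- stated objective: faster
-- what changed: A scans all O(n^4) index quadruples testing each point against every triple's bounding box; B instead classifies, for each point, the other points into the 9 sign classes (left/right/equal x times below/above/equal y) in one O(n) pass and decides with a constant-size search over class triples whether three distinct other points can cover all four strict directions, giving O(n^2) total.
import Mathlib
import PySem

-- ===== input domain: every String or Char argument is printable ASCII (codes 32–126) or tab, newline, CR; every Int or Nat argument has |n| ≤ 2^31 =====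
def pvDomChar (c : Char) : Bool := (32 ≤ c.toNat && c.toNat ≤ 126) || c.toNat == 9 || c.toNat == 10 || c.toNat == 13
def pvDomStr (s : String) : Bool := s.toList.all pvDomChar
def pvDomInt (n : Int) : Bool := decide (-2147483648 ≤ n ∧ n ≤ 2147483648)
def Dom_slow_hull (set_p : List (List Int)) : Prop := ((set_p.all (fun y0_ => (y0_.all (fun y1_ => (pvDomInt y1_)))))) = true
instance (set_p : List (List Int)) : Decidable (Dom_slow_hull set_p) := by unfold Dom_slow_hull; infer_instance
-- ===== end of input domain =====

-- B replaces A's quadruple loop over index tuples by a per-point O(n) direction-class count plus a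
-- constant-size 3-class cover search (objective: faster; return-value equivalence proved below).

-- ===== PORT A =====
def is_p3_in_triangle (p0 p1 p2 p3 : List Int) : Bool :=
  let x_list_triangle := [PySem.List.pyGetD p0 0 0, PySem.List.pyGetD p1 0 0, PySem.List.pyGetD p2 0 0]
  let y_list_triangle := [PySem.List.pyGetD p0 1 0, PySem.List.pyGetD p1 1 0, PySem.List.pyGetD p2 1 0]
  if (PySem.List.min? x_list_triangle (fun v => v)).getD 0 < PySem.List.pyGetD p3 0 0
      && PySem.List.pyGetD p3 0 0 < (PySem.List.max? x_list_triangle (fun v => v)).getD 0 then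
    if (PySem.List.min? y_list_triangle (fun v => v)).getD 0 < PySem.List.pyGetD p3 1 0
        && PySem.List.pyGetD p3 1 0 < (PySem.List.max? y_list_triangle (fun v => v)).getD 0 then
      true
    else false
  else false

-- the innermost 'for l' loop of A (indices drawn from range(n) are nonnegative, so .toNat is exact)
def pvLoopL (set_p : List (List Int)) (n : Int) (p0 p1 p2 : List Int) (i j k : Int) (fl : List Bool) : List Bool :=
  (PySem.List.pyRange 0 n 1).foldl (fun fl l =>
    if i == l || j == l || k == l then fl
    else
      let p3 := PySem.List.pyGetD set_p l []
      if is_p3_in_triangle p0 p1 p2 p3 then fl.set l.toNat true else fl) fl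

def pvLoopK (set_p : List (List Int)) (n : Int) (p0 p1 : List Int) (i j : Int) (fl : List Bool) : List Bool :=
  (PySem.List.pyRange 0 n 1).foldl (fun fl k =>
    if i == k || j == k then fl
    else
      let p2 := PySem.List.pyGetD set_p k []
      pvLoopL set_p n p0 p1 p2 i j k fl) fl

def pvLoopJ (set_p : List (List Int)) (n : Int) (p0 : List Int) (i : Int) (fl : List Bool) : List Bool :=
  (PySem.List.pyRange 0 n 1).foldl (fun fl j =>
    if i == j then fl
    else
      let p1 := PySem.List.pyGetD set_p j []
      pvLoopK set_p n p0 p1 i j fl) fl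

def pvLoopI (set_p : List (List Int)) (n : Int) (fl : List Bool) : List Bool :=
  (PySem.List.pyRange 0 n 1).foldl (fun fl i =>
    let p0 := PySem.List.pyGetD set_p i []
    pvLoopJ set_p n p0 i fl) fl

def slow_hull (set_p : List (List Int)) : List (List Int) :=
  let len_of_set_p : Int := set_p.length
  let list_flag_of_p : List Bool := List.replicate len_of_set_p.toNat false
  let list_flag_of_p := pvLoopI set_p len_of_set_p list_flag_of_p
  ((PySem.List.pyRange 0 len_of_set_p 1).filter
      (fun i => !(PySem.List.pyGetD list_flag_of_p i false))).map
    (fun i => PySem.List.pyGetD set_p i [])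

-- ===== PORT B =====
def pvCovers (trip : List (Int × Int)) : Bool :=
  trip.any (fun t => t.1 < 0) && trip.any (fun t => t.1 > 0)
    && trip.any (fun t => t.2 < 0) && trip.any (fun t => t.2 > 0)

def pvOk (ca cb cc : Int × Int) (cnt : PySem.Dict (Int × Int) Int) : Bool :=
  let trip := [ca, cb, cc]
  -- cnt[t] for t in trip: every t is a key of cnt, so getD is exact here
  if trip.any (fun t => (PySem.List.count trip t : Int) > cnt.getD t 0) then false
  else pvCovers trip

def pvFeasible (cnt : PySem.Dict (Int × Int) Int) : Bool :=
  let classes := cnt.keys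
  let m : Int := classes.length
  (PySem.List.pyRange 0 m 1).any (fun a =>
    (PySem.List.pyRange a m 1).any (fun b =>
      (PySem.List.pyRange b m 1).any (fun c =>
        pvOk (PySem.List.pyGetD classes a (0, 0)) (PySem.List.pyGetD classes b (0, 0))
          (PySem.List.pyGetD classes c (0, 0)) cnt)))

-- dx = (q[0] > x) - (q[0] < x), dy likewise (bool arithmetic ported as 1/0)
def pvClass (x y : Int) (q : List Int) : Int × Int :=
  ((if PySem.List.pyGetD q 0 0 > x then (1 : Int) else 0) - (if PySem.List.pyGetD q 0 0 < x then 1 else 0),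
   (if PySem.List.pyGetD q 1 0 > y then (1 : Int) else 0) - (if PySem.List.pyGetD q 1 0 < y then 1 else 0))

def pvCnt (set_p : List (List Int)) (n : Int) (l x y : Int) : PySem.Dict (Int × Int) Int :=
  (PySem.List.pyRange 0 n 1).foldl (fun cnt j =>
    if j == l then cnt
    else
      let q := PySem.List.pyGetD set_p j []
      let key := pvClass x y q
      cnt.insert key (cnt.getD key 0 + 1)) PySem.Dict.empty

def slow_hull_alt (set_p : List (List Int)) : List (List Int) :=
  let n : Int := set_p.length
  if n < 4 then set_p.map (fun p => p)
  else
    (PySem.List.pyRange 0 n 1).foldl (fun out l =>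
      let pl := PySem.List.pyGetD set_p l []
      let x := PySem.List.pyGetD pl 0 0
      let y := PySem.List.pyGetD pl 1 0
      let cnt := pvCnt set_p n l x y
      if !pvFeasible cnt then out ++ [pl] else out) []

-- ===== PRECONDITION & SPEC =====
-- Pre_ excludes exactly the inputs on which the Python A raises IndexError: when there are at least
-- four points, every point is read at indices 0 and 1, so a point with fewer than 2 coordinates crashes.
def Pre_slow_hull (set_p : List (List Int)) : Prop :=
  4 ≤ set_p.length → ∀ p ∈ set_p, 2 ≤ p.length
instance (set_p : List (List Int)) : Decidable (Pre_slow_hull set_p) := by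
  unfold Pre_slow_hull; infer_instance

def pvWitness_slow_hull : List (List Int) := [[0, 0], [2, 0], [0, 2], [1, 1]]

def Spec_slow_hull (set_p : List (List Int)) (out : List (List Int)) : Prop := out = slow_hull_alt set_p
instance (set_p : List (List Int)) (out : List (List Int)) : Decidable (Spec_slow_hull set_p out) := by unfold Spec_slow_hull; infer_instance

-- ===== CLAIM (what is proved, stated in full; the proofs are below) =====
def Claim_equal_slow_hull : Prop := ∀ (set_p : List (List Int)), Dom_slow_hull set_p → Pre_slow_hull set_p → Spec_slow_hull set_p (slow_hull set_p)

-- ===== LEMMAS AND PROOFS =====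

-- ---- generic fold facts ----
theorem pvFoldLen {α : Type} (L : List α) (F : List Bool → α → List Bool)
    (hlen : ∀ fl x, (F fl x).length = fl.length) (fl : List Bool) :
    (L.foldl F fl).length = fl.length := by
  induction L generalizing fl with
  | nil => rfl
  | cons a t ih => simpa [List.foldl_cons, hlen] using ih (F fl a)

theorem pvFoldOr (L : List Int) (F : List Bool → Int → List Bool) (h : Int → Nat → Bool)
    (hlen : ∀ fl x, (F fl x).length = fl.length)
    (hget : ∀ fl x (m : Nat), x ∈ L → m < fl.length →
      (F fl x).getD m false = (fl.getD m false || h x m))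
    (fl : List Bool) (m : Nat) (hm : m < fl.length) :
    (L.foldl F fl).getD m false = (fl.getD m false || L.any (fun x => h x m)) := by
  induction L generalizing fl with
  | nil => simp
  | cons a t ih =>
      have h1 : (F fl a).getD m false = (fl.getD m false || h a m) :=
        hget fl a m (by simp) hm
      have h2 := ih (fun fl x m hx hm => hget fl x m (by simp [hx]) hm) (F fl a)
        (by rw [hlen]; exact hm)
      rw [List.foldl_cons, List.any_cons, h2, h1, Bool.or_assoc]

theorem pvFoldGF {β γ : Type} (L : List Int) (p : Int → Bool) (f : Int → γ)
    (g : β → γ → β) (init : β) :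
    L.foldl (fun acc x => if p x then acc else g acc (f x)) init
      = ((L.filter (fun x => !p x)).map f).foldl g init := by
  induction L generalizing init with
  | nil => rfl
  | cons a t ih => cases hpa : p a <;> simp [List.foldl_cons, hpa, ih]

theorem pvSetGetD (fl : List Bool) (x : Int) (m : Nat) (hx : 0 ≤ x) (hm : m < fl.length) :
    (fl.set x.toNat true).getD m false = (fl.getD m false || (x == (m : Int))) := by
  by_cases hxm : x.toNat = m
  · have hb : (x == (m : Int)) = true := by
      simp only [beq_iff_eq]; omega
    rw [hb, Bool.or_true, List.getD_eq_getElem?_getD, hxm, List.getElem?_set_self hm]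
    rfl
  · have hb : (x == (m : Int)) = false := by
      simp only [beq_eq_false_iff_ne, ne_eq]; omega
    rw [hb, Bool.or_false, List.getD_eq_getElem?_getD, List.getElem?_set_ne hxm,
      List.getD_eq_getElem?_getD]

-- ---- A-side flag characterization ----
theorem pvLoopL_len (sp : List (List Int)) (n : Int) (p0 p1 p2 : List Int) (i j k : Int)
    (fl : List Bool) : (pvLoopL sp n p0 p1 p2 i j k fl).length = fl.length := by
  apply pvFoldLen
  intro fl x
  dsimp only
  split_ifs <;> simp

theorem pvLoopL_getD (sp : List (List Int)) (n : Int) (p0 p1 p2 : List Int) (i j k : Int)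
    (fl : List Bool) (m : Nat) (hm : m < fl.length) :
    (pvLoopL sp n p0 p1 p2 i j k fl).getD m false
      = (fl.getD m false || (PySem.List.pyRange 0 n 1).any (fun l =>
          !(i == l || j == l || k == l)
            && is_p3_in_triangle p0 p1 p2 (PySem.List.pyGetD sp l [])
            && (l == (m : Int)))) := by
  apply pvFoldOr
  · intro fl x; dsimp only; split_ifs <;> simp
  · intro fl x m hx hm
    have hx0 : 0 ≤ x := (PySem.List.mem_pyRange_one.mp hx).1
    dsimp only
    by_cases hg : (i == x || j == x || k == x) = true
    · simp [hg]
    · rw [if_neg (by simp_all)]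
      by_cases ht : is_p3_in_triangle p0 p1 p2 (PySem.List.pyGetD sp x []) = true
      · rw [if_pos ht, pvSetGetD fl x m hx0 hm]
        simp [hg, ht]
      · rw [if_neg ht]
        simp [hg, ht]
  · exact hm

-- Bool-level "some admissible (i,j,k) flags position m" predicates, one per loop level
def pvA4 (sp : List (List Int)) (n : Int) (p0 p1 p2 : List Int) (i j k : Int) (m : Nat) : Bool :=
  (PySem.List.pyRange 0 n 1).any (fun l =>
    !(i == l || j == l || k == l)
      && is_p3_in_triangle p0 p1 p2 (PySem.List.pyGetD sp l []) && (l == (m : Int)))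

def pvA3 (sp : List (List Int)) (n : Int) (p0 p1 : List Int) (i j : Int) (m : Nat) : Bool :=
  (PySem.List.pyRange 0 n 1).any (fun k =>
    !(i == k || j == k) && pvA4 sp n p0 p1 (PySem.List.pyGetD sp k []) i j k m)

def pvA2 (sp : List (List Int)) (n : Int) (p0 : List Int) (i : Int) (m : Nat) : Bool :=
  (PySem.List.pyRange 0 n 1).any (fun j =>
    !(i == j) && pvA3 sp n p0 (PySem.List.pyGetD sp j []) i j m)

def pvA1 (sp : List (List Int)) (n : Int) (m : Nat) : Bool :=
  (PySem.List.pyRange 0 n 1).any (fun i => pvA2 sp n (PySem.List.pyGetD sp i []) i m)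

theorem pvLoopK_len (sp : List (List Int)) (n : Int) (p0 p1 : List Int) (i j : Int)
    (fl : List Bool) : (pvLoopK sp n p0 p1 i j fl).length = fl.length := by
  apply pvFoldLen
  intro fl x
  dsimp only
  split_ifs <;> simp [pvLoopL_len]

theorem pvLoopK_getD (sp : List (List Int)) (n : Int) (p0 p1 : List Int) (i j : Int)
    (fl : List Bool) (m : Nat) (hm : m < fl.length) :
    (pvLoopK sp n p0 p1 i j fl).getD m false
      = (fl.getD m false || (PySem.List.pyRange 0 n 1).any (fun k =>
          !(i == k || j == k) && pvA4 sp n p0 p1 (PySem.List.pyGetD sp k []) i j k m)) := by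
  apply pvFoldOr
  · intro fl x; dsimp only; split_ifs <;> simp [pvLoopL_len]
  · intro fl x m hx hm
    dsimp only
    by_cases hg : (i == x || j == x) = true
    · simp [hg]
    · rw [if_neg (by simp_all), pvLoopL_getD sp n p0 p1 _ i j x fl m hm]
      simp only [Bool.not_eq_true] at hg
      rw [hg]
      rfl
  · exact hm

theorem pvLoopJ_len (sp : List (List Int)) (n : Int) (p0 : List Int) (i : Int)
    (fl : List Bool) : (pvLoopJ sp n p0 i fl).length = fl.length := by
  apply pvFoldLen
  intro fl x
  dsimp only
  split_ifs <;> simp [pvLoopK_len]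

theorem pvLoopJ_getD (sp : List (List Int)) (n : Int) (p0 : List Int) (i : Int)
    (fl : List Bool) (m : Nat) (hm : m < fl.length) :
    (pvLoopJ sp n p0 i fl).getD m false = (fl.getD m false || pvA2 sp n p0 i m) := by
  unfold pvA2
  apply pvFoldOr
  · intro fl x; dsimp only; split_ifs <;> simp [pvLoopK_len]
  · intro fl x m hx hm
    dsimp only
    by_cases hg : (i == x) = true
    · simp [hg]
    · rw [if_neg (by simp_all), pvLoopK_getD sp n p0 _ i x fl m hm]
      simp only [Bool.not_eq_true] at hg
      rw [hg]
      rfl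
  · exact hm

theorem pvLoopI_getD (sp : List (List Int)) (n : Int) (fl : List Bool) (m : Nat)
    (hm : m < fl.length) :
    (pvLoopI sp n fl).getD m false = (fl.getD m false || pvA1 sp n m) := by
  unfold pvA1
  apply pvFoldOr
  · intro fl x; dsimp only; exact pvLoopJ_len sp n _ x fl
  · intro fl x m hx hm
    dsimp only
    exact pvLoopJ_getD sp n _ x fl m hm
  · exact hm

-- Prop form of the flag predicate: some admissible quadruple (i,j,k,m) puts m in a bounding box
theorem pvA1_iff (sp : List (List Int)) (n : Int) (m : Nat) (hm : (m : Int) < n) :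
    pvA1 sp n m = true ↔ ∃ i j k : Int,
      (0 ≤ i ∧ i < n) ∧ (0 ≤ j ∧ j < n) ∧ (0 ≤ k ∧ k < n) ∧
      i ≠ j ∧ i ≠ k ∧ j ≠ k ∧ i ≠ (m : Int) ∧ j ≠ (m : Int) ∧ k ≠ (m : Int) ∧
      is_p3_in_triangle (PySem.List.pyGetD sp i []) (PySem.List.pyGetD sp j [])
        (PySem.List.pyGetD sp k []) (PySem.List.pyGetD sp (m : Int) []) = true := by
  simp only [pvA1, pvA2, pvA3, pvA4, List.any_eq_true, PySem.List.mem_pyRange_one,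
    Bool.and_eq_true, Bool.not_eq_true', Bool.or_eq_false_iff, beq_eq_false_iff_ne,
    ne_eq, beq_iff_eq]
  constructor
  · rintro ⟨i, hi, j, hj, hij, k, hk, ⟨hik, hjk⟩, l, hl, ⟨⟨⟨hil, hjl⟩, hkl⟩, htri⟩, rfl⟩
    exact ⟨i, j, k, hi, hj, hk, hij, hik, hjk, hil, hjl, hkl, htri⟩
  · rintro ⟨i, j, k, hi, hj, hk, hij, hik, hjk, him, hjm, hkm, htri⟩
    exact ⟨i, hi, j, hj, hij, k, hk, ⟨hik, hjk⟩,
      (m : Int), ⟨by omega, hm⟩, ⟨⟨⟨him, hjm⟩, hkm⟩, htri⟩, rfl⟩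

-- ---- the strict bounding-box test, rephrased through B's direction classes ----
theorem pvSgnNeg (u v : Int) :
    ((if u > v then (1 : Int) else 0) - (if u < v then 1 else 0) < 0) ↔ u < v := by
  split_ifs <;> omega

theorem pvSgnPos (u v : Int) :
    (0 < (if u > v then (1 : Int) else 0) - (if u < v then 1 else 0)) ↔ v < u := by
  split_ifs <;> omega

theorem pvTriIffCovers (p0 p1 p2 p3 : List Int) :
    is_p3_in_triangle p0 p1 p2 p3
      = pvCovers [pvClass (PySem.List.pyGetD p3 0 0) (PySem.List.pyGetD p3 1 0) p0,
          pvClass (PySem.List.pyGetD p3 0 0) (PySem.List.pyGetD p3 1 0) p1,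
          pvClass (PySem.List.pyGetD p3 0 0) (PySem.List.pyGetD p3 1 0) p2] := by
  rw [Bool.eq_iff_iff]
  simp only [is_p3_in_triangle, pvCovers, pvClass, PySem.List.min?_id_cons,
    PySem.List.max?_id_cons, List.foldl_cons, List.foldl_nil, Option.getD_some,
    List.any_cons, List.any_nil, Bool.and_eq_true, Bool.or_eq_true, decide_eq_true_eq,
    Bool.if_false_right, Bool.and_eq_true, Bool.or_false,
    pvSgnNeg, pvSgnPos]
  simp only [min_lt_iff, lt_max_iff, and_true, or_assoc, and_assoc]

-- ---- B-side: the counting dict is a counter of the class list of the other points ----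
def pvOthers (n l : Int) : List Int :=
  (PySem.List.pyRange 0 n 1).filter (fun j => !(j == l))

def pvC (sp : List (List Int)) (n l x y : Int) : List (Int × Int) :=
  (pvOthers n l).map (fun j => pvClass x y (PySem.List.pyGetD sp j []))

theorem pvCnt_eq_counter (sp : List (List Int)) (n l x y : Int) :
    pvCnt sp n l x y = PySem.Dict.counter (pvC sp n l x y) := by
  simp only [pvCnt, pvC, pvOthers]
  exact (pvFoldGF (PySem.List.pyRange 0 n 1) (fun j => j == l)
    (fun j => pvClass x y (PySem.List.pyGetD sp j []))
    (fun (cnt : PySem.Dict (Int × Int) Int) key => cnt.insert key (cnt.getD key 0 + 1)) PySem.Dict.empty).trans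
    (PySem.Dict.foldl_insert_getD_add_one_eq_counter _)

-- ---- permutation invariance of B's constant-size checks ----
theorem pvCovers_perm (t1 t2 : List (Int × Int)) (h : t1.Perm t2) :
    pvCovers t1 = pvCovers t2 := by
  unfold pvCovers
  rw [h.any_eq, h.any_eq, h.any_eq, h.any_eq]

theorem pvOk_perm (ca cb cc ca' cb' cc' : Int × Int) (cnt : PySem.Dict (Int × Int) Int)
    (h : List.Perm [ca, cb, cc] [ca', cb', cc']) :
    pvOk ca cb cc cnt = pvOk ca' cb' cc' cnt := by
  unfold pvOk
  have hfun : (fun t => decide ((PySem.List.count [ca, cb, cc] t : Int) > cnt.getD t 0))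
      = (fun t => decide ((PySem.List.count [ca', cb', cc'] t : Int) > cnt.getD t 0)) := by
    funext t
    rw [PySem.List.count_eq, PySem.List.count_eq, h.count_eq]
  simp only [hfun, h.any_eq, pvCovers_perm _ _ h]

-- ---- B's feasibility check, characterized by counts over the class list ----
theorem pvOk_counter_iff (C : List (Int × Int)) (a b c : Int × Int) :
    pvOk a b c (PySem.Dict.counter C) = true
      ↔ (List.Subperm [a, b, c] C ∧ pvCovers [a, b, c] = true) := by
  unfold pvOk
  by_cases hbad : ([a, b, c].any
      (fun t => decide ((PySem.List.count [a, b, c] t : Int) > (PySem.Dict.counter C).getD t 0))) = true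
  · rw [if_pos hbad]
    simp only [Bool.false_eq_true, false_iff, not_and]
    intro hsub
    exfalso
    simp only [List.any_eq_true, decide_eq_true_eq, PySem.List.count_eq,
      PySem.Dict.getD_counter] at hbad
    obtain ⟨t, ht, hgt⟩ := hbad
    have := List.subperm_ext_iff.mp hsub t ht
    omega
  · rw [if_neg hbad]
    have hcnt : ∀ t ∈ [a, b, c], [a, b, c].count t ≤ C.count t := by
      intro t htm
      by_contra hgt
      apply hbad
      simp only [List.any_eq_true, decide_eq_true_eq, PySem.List.count_eq,
        PySem.Dict.getD_counter]
      exact ⟨t, htm, by omega⟩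
    have hsub : List.Subperm [a, b, c] C := List.subperm_ext_iff.mpr hcnt
    constructor
    · intro hcov; exact ⟨hsub, hcov⟩
    · rintro ⟨-, hcov⟩; exact hcov

-- ---- bridge: three pairwise-distinct indices exist iff a 3-element sub-multiset of the class list exists ----
theorem pvSubpermMap {α β : Type} (f : α → β) {l1 l2 : List α} (h : l1.Subperm l2) :
    (l1.map f).Subperm (l2.map f) := by
  obtain ⟨t, hp, hs⟩ := h
  exact ⟨t.map f, hp.map f, hs.map f⟩

theorem pvBridge (D : List Int) (hD : D.Nodup) (f : Int → Int × Int) :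
    (∃ i j k : Int, i ∈ D ∧ j ∈ D ∧ k ∈ D ∧ i ≠ j ∧ i ≠ k ∧ j ≠ k
        ∧ pvCovers [f i, f j, f k] = true)
    ↔ (∃ a b c : Int × Int, List.Subperm [a, b, c] (D.map f) ∧ pvCovers [a, b, c] = true) := by
  constructor
  · rintro ⟨i, j, k, hi, hj, hk, hij, hik, hjk, hcov⟩
    refine ⟨f i, f j, f k, ?_, hcov⟩
    have hnd : ([i, j, k] : List Int).Nodup := by simp [hij, hik, hjk]
    have hsub : List.Subperm [i, j, k] D := List.subperm_of_subset hnd (by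
      intro x hx
      simp only [List.mem_cons, List.not_mem_nil, or_false] at hx
      rcases hx with rfl | rfl | rfl <;> assumption)
    simpa using pvSubpermMap f hsub
  · rintro ⟨a, b, c, hsub, hcov⟩
    obtain ⟨l2, hperm, hsl⟩ := hsub
    obtain ⟨D', hslD, hmap⟩ := List.sublist_map_iff.mp hsl
    subst hmap
    have hlen : D'.length = 3 := by simpa using hperm.length_eq
    obtain ⟨i, j, k, rfl⟩ : ∃ i j k : Int, D' = [i, j, k] := by
      rcases D' with - | ⟨i, - | ⟨j, - | ⟨k, - | ⟨d, r⟩⟩⟩⟩ <;> simp at hlen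
      exact ⟨i, j, k, rfl⟩
    have hnd : ([i, j, k] : List Int).Nodup := hD.sublist hslD
    have hmem : ∀ x ∈ ([i, j, k] : List Int), x ∈ D := fun x hx => hslD.subset hx
    simp only [List.nodup_cons, List.mem_cons, List.not_mem_nil, or_false,
      List.nodup_nil, and_true, not_or] at hnd
    refine ⟨i, j, k, hmem i (by simp), hmem j (by simp), hmem k (by simp),
      hnd.1.1, hnd.1.2, hnd.2.1, ?_⟩
    have heq : pvCovers ([i, j, k].map f) = pvCovers [a, b, c] := pvCovers_perm _ _ hperm
    simp only [List.map_cons, List.map_nil] at heq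
    rw [heq]
    exact hcov

-- ---- B's triple-index search finds a feasible triple iff one exists among the key values ----
theorem pvFeasible_of_idx (cnt : PySem.Dict (Int × Int) Int) (u v w : Nat)
    (huv : u ≤ v) (hvw : v ≤ w) (hw : w < cnt.keys.length)
    (hok : pvOk (cnt.keys.getD u (0, 0)) (cnt.keys.getD v (0, 0)) (cnt.keys.getD w (0, 0)) cnt
      = true) : pvFeasible cnt = true := by
  simp only [pvFeasible, List.any_eq_true, PySem.List.mem_pyRange_one]
  refine ⟨(u : Int), ⟨by omega, by omega⟩, (v : Int), ⟨by omega, by omega⟩,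
    (w : Int), ⟨by omega, by omega⟩, ?_⟩
  rw [PySem.List.pyGetD_natCast, PySem.List.pyGetD_natCast, PySem.List.pyGetD_natCast]
  exact hok

theorem pvFeasible_iff (cnt : PySem.Dict (Int × Int) Int) :
    pvFeasible cnt = true
      ↔ ∃ a b c : Int × Int, a ∈ cnt.keys ∧ b ∈ cnt.keys ∧ c ∈ cnt.keys
          ∧ pvOk a b c cnt = true := by
  constructor
  · intro h
    simp only [pvFeasible, List.any_eq_true, PySem.List.mem_pyRange_one] at h
    obtain ⟨a, ⟨ha0, ham⟩, b, ⟨hab, hbm⟩, c, ⟨hbc, hcm⟩, hok⟩ := h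
    have hb0 : 0 ≤ b := by omega
    have hc0 : 0 ≤ c := by omega
    rw [PySem.List.pyGetD_of_nonneg _ _ ha0, PySem.List.pyGetD_of_nonneg _ _ hb0,
      PySem.List.pyGetD_of_nonneg _ _ hc0] at hok
    have hmem : ∀ z : Int, 0 ≤ z → z < (cnt.keys.length : Int) →
        cnt.keys.getD z.toNat (0, 0) ∈ cnt.keys := by
      intro z h0 hz
      have hlt : z.toNat < cnt.keys.length := by omega
      rw [List.getD_eq_getElem _ _ hlt]
      exact List.getElem_mem hlt
    exact ⟨_, _, _, hmem a ha0 ham, hmem b hb0 hbm, hmem c hc0 hcm, hok⟩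
  · rintro ⟨a, b, c, ha, hb, hc, hok⟩
    obtain ⟨u, hu, hua⟩ := List.mem_iff_getElem.mp ha
    obtain ⟨v, hv, hvb⟩ := List.mem_iff_getElem.mp hb
    obtain ⟨w, hw, hwc⟩ := List.mem_iff_getElem.mp hc
    have hga : cnt.keys.getD u (0, 0) = a := by rw [List.getD_eq_getElem _ _ hu, hua]
    have hgb : cnt.keys.getD v (0, 0) = b := by rw [List.getD_eq_getElem _ _ hv, hvb]
    have hgc : cnt.keys.getD w (0, 0) = c := by rw [List.getD_eq_getElem _ _ hw, hwc]
    have p_bac : ([b, a, c] : List (Int × Int)).Perm [a, b, c] := List.Perm.swap a b [c]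
    have p_acb : ([a, c, b] : List (Int × Int)).Perm [a, b, c] :=
      List.Perm.cons a (List.Perm.swap b c [])
    have p_cab : ([c, a, b] : List (Int × Int)).Perm [a, b, c] :=
      (List.Perm.swap a c [b]).trans p_acb
    have p_bca : ([b, c, a] : List (Int × Int)).Perm [a, b, c] :=
      (List.Perm.cons b (List.Perm.swap a c [])).trans p_bac
    have p_cba : ([c, b, a] : List (Int × Int)).Perm [a, b, c] :=
      (List.Perm.swap b c [a]).trans p_bca
    rcases le_total u v with huv | hvu
    · rcases le_total v w with hvw | hwv
      · exact pvFeasible_of_idx cnt u v w huv hvw hw (by rw [hga, hgb, hgc]; exact hok)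
      · rcases le_total u w with huw | hwu
        · exact pvFeasible_of_idx cnt u w v huw hwv hv
            (by rw [hga, hgb, hgc]; exact (pvOk_perm _ _ _ a b c cnt p_acb).trans hok)
        · exact pvFeasible_of_idx cnt w u v hwu huv hv
            (by rw [hga, hgb, hgc]; exact (pvOk_perm _ _ _ a b c cnt p_cab).trans hok)
    · rcases le_total u w with huw | hwu
      · exact pvFeasible_of_idx cnt v u w hvu huw hw
          (by rw [hga, hgb, hgc]; exact (pvOk_perm _ _ _ a b c cnt p_bac).trans hok)
      · rcases le_total v w with hvw | hwv
        · exact pvFeasible_of_idx cnt v w u hvw hwu hu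
            (by rw [hga, hgb, hgc]; exact (pvOk_perm _ _ _ a b c cnt p_bca).trans hok)
        · exact pvFeasible_of_idx cnt w v u hwv hvu hu
            (by rw [hga, hgb, hgc]; exact (pvOk_perm _ _ _ a b c cnt p_cba).trans hok)

theorem pvLoopI_len (sp : List (List Int)) (n : Int) (fl : List Bool) :
    (pvLoopI sp n fl).length = fl.length :=
  pvFoldLen _ _ (fun fl x => pvLoopJ_len sp n _ x fl) fl

-- ---- per-point equivalence: A's flag is B's feasibility test ----
theorem pvPoint (sp : List (List Int)) (m : Nat) (hm : (m : Int) < (sp.length : Int)) :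
    pvA1 sp (sp.length : Int) m
      = pvFeasible (pvCnt sp (sp.length : Int) (m : Int)
          (PySem.List.pyGetD (PySem.List.pyGetD sp (m : Int) []) 0 0)
          (PySem.List.pyGetD (PySem.List.pyGetD sp (m : Int) []) 1 0)) := by
  set n : Int := (sp.length : Int) with hn
  set x : Int := PySem.List.pyGetD (PySem.List.pyGetD sp (m : Int) []) 0 0 with hx
  set y : Int := PySem.List.pyGetD (PySem.List.pyGetD sp (m : Int) []) 1 0 with hy
  have hD : (pvOthers n (m : Int)).Nodup :=
    List.Nodup.filter _ (PySem.List.nodup_pyRange_one 0 n)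
  have hmemD : ∀ z : Int, z ∈ pvOthers n (m : Int) ↔ (0 ≤ z ∧ z < n) ∧ z ≠ (m : Int) := by
    intro z
    simp [pvOthers, List.mem_filter, PySem.List.mem_pyRange_one, and_comm]
  rw [Bool.eq_iff_iff, pvA1_iff sp n m hm, pvCnt_eq_counter]
  have hC : pvC sp n (m : Int) x y
      = (pvOthers n (m : Int)).map (fun j => pvClass x y (PySem.List.pyGetD sp j [])) := rfl
  constructor
  · rintro ⟨i, j, k, hi, hj, hk, hij, hik, hjk, him, hjm, hkm, htri⟩
    rw [pvTriIffCovers] at htri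
    have hbr := (pvBridge (pvOthers n (m : Int)) hD
        (fun j => pvClass x y (PySem.List.pyGetD sp j []))).mp
      ⟨i, j, k, (hmemD i).mpr ⟨hi, him⟩, (hmemD j).mpr ⟨hj, hjm⟩, (hmemD k).mpr ⟨hk, hkm⟩,
        hij, hik, hjk, htri⟩
    obtain ⟨a, b, c, hsub, hcov⟩ := hbr
    rw [← hC] at hsub
    have hmemC : ∀ t ∈ ([a, b, c] : List (Int × Int)),
        t ∈ (PySem.Dict.counter (pvC sp n (m : Int) x y)).keys := by
      intro t ht
      rw [PySem.Dict.keys_counter, PySem.Set.mem_ofList]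
      exact hsub.subset ht
    exact (pvFeasible_iff _).mpr ⟨a, b, c, hmemC a (by simp), hmemC b (by simp),
      hmemC c (by simp), (pvOk_counter_iff _ a b c).mpr ⟨hsub, hcov⟩⟩
  · intro hfeas
    obtain ⟨a, b, c, -, -, -, hok⟩ := (pvFeasible_iff _).mp hfeas
    obtain ⟨hsub, hcov⟩ := (pvOk_counter_iff _ a b c).mp hok
    rw [hC] at hsub
    obtain ⟨i, j, k, hi, hj, hk, hij, hik, hjk, hcov'⟩ :=
      (pvBridge (pvOthers n (m : Int)) hD
        (fun j => pvClass x y (PySem.List.pyGetD sp j []))).mpr ⟨a, b, c, hsub, hcov⟩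
    rw [← pvTriIffCovers] at hcov'
    exact ⟨i, j, k, ((hmemD i).mp hi).1, ((hmemD j).mp hj).1, ((hmemD k).mp hk).1,
      hij, hik, hjk, ((hmemD i).mp hi).2, ((hmemD j).mp hj).2, ((hmemD k).mp hk).2, hcov'⟩

-- ---- both programs as filter-and-map over the index range ----
theorem pvAeq (sp : List (List Int)) :
    slow_hull sp = ((PySem.List.pyRange 0 (sp.length : Int) 1).filter
        (fun i => !pvA1 sp (sp.length : Int) i.toNat)).map
      (fun i => PySem.List.pyGetD sp i []) := by
  simp only [slow_hull]
  congr 1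
  apply List.filter_congr
  intro i hi
  obtain ⟨hi0, hin⟩ := PySem.List.mem_pyRange_one.mp hi
  have hlen : (pvLoopI sp (sp.length : Int)
      (List.replicate ((sp.length : Int)).toNat false)).length = sp.length := by
    rw [pvLoopI_len, List.length_replicate]
    omega
  have hmlt : i.toNat < (List.replicate ((sp.length : Int)).toNat false).length := by
    rw [List.length_replicate]; omega
  rw [PySem.List.pyGetD_of_nonneg _ _ hi0, List.getD_eq_getElem?_getD,
    ← List.getD_eq_getElem?_getD, pvLoopI_getD sp _ _ _ hmlt]
  congr 1
  rw [List.getD_eq_getElem _ _ hmlt]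
  simp

theorem pvBeq (sp : List (List Int)) (h : ¬ (sp.length : Int) < 4) :
    slow_hull_alt sp = ((PySem.List.pyRange 0 (sp.length : Int) 1).filter
        (fun l => !pvFeasible (pvCnt sp (sp.length : Int) l
          (PySem.List.pyGetD (PySem.List.pyGetD sp l []) 0 0)
          (PySem.List.pyGetD (PySem.List.pyGetD sp l []) 1 0)))).map
      (fun l => PySem.List.pyGetD sp l []) := by
  simp only [slow_hull_alt, if_neg h]
  exact (PySem.List.foldl_append_if
    (fun l => !pvFeasible (pvCnt sp (sp.length : Int) l
      (PySem.List.pyGetD (PySem.List.pyGetD sp l []) 0 0)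
      (PySem.List.pyGetD (PySem.List.pyGetD sp l []) 1 0)))
    (fun l => PySem.List.pyGetD sp l [])
    (PySem.List.pyRange 0 (sp.length : Int) 1) []).trans (List.nil_append _)

-- ---- main equivalence ----
theorem pvMain (sp : List (List Int)) : slow_hull sp = slow_hull_alt sp := by
  by_cases h4 : (sp.length : Int) < 4
  · -- fewer than four points: no quadruple of distinct indices exists, A keeps everything
    have hA1 : ∀ i : Int, i ∈ PySem.List.pyRange 0 (sp.length : Int) 1 →
        (!pvA1 sp (sp.length : Int) i.toNat) = true := by
      intro i hi
      obtain ⟨hi0, hin⟩ := PySem.List.mem_pyRange_one.mp hi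
      rw [Bool.not_eq_true']
      rw [← Bool.not_eq_true]
      intro hcon
      obtain ⟨a, b, c, ha, hb, hc, hab, hac, hbc, ham, hbm, hcm, -⟩ :=
        (pvA1_iff sp (sp.length : Int) i.toNat (by omega)).mp hcon
      have : (i.toNat : Int) = i := Int.toNat_of_nonneg hi0
      omega
    rw [pvAeq, List.filter_eq_self.mpr hA1]
    simp only [slow_hull_alt, if_pos h4]
    rw [show (sp.map fun p => p) = sp from List.map_id' sp]
    exact PySem.List.map_pyGetD_pyRange_zero' sp []
  · rw [pvAeq, pvBeq sp h4]
    congr 1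
    apply List.filter_congr
    intro i hi
    obtain ⟨hi0, hin⟩ := PySem.List.mem_pyRange_one.mp hi
    have hti : ((i.toNat : Nat) : Int) = i := Int.toNat_of_nonneg hi0
    have := pvPoint sp i.toNat (by omega)
    rw [hti] at this
    rw [this]

-- ===== VERDICT (by name: the statement is the Claim_ definition above) =====
theorem slow_hull_spec : Claim_equal_slow_hull := by
  intro set_p _ _
  exact pvMain set_p
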